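-- pv_equiv track=rewrite | github.com/abe-101/podcast | podcast/shows/kidushin.py | number_to_hebrew
-- ===== SOURCE A (Python) =====
-- def number_to_hebrew(num):
--     if num <= 0 or num > 200:
--         raise ValueError("Number out of supported range")
--
--     hebrew_numerals = {
--         1: "א",
--         2: "ב",
--         3: "ג",
--         4: "ד",
--         5: "ה",
--         6: "ו",
--         7: "ז",
--         8: "ח",
--         9: "ט",
--         10: "י",
--         20: "כ",
--         30: "ל",
--         40: "מ",
--         50: "נ",
--         60: "ס",
--         70: "ע",
--         80: "פ",
--         90: "צ",
--         100: "ק",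
--         200: "ר",
--     }
--
--     result = []
--     for value, letter in sorted(hebrew_numerals.items(), key=lambda x: x[0], reverse=True):
--         while num >= value:
--             result.append(letter)
--             num -= value
--
--     return "".join(result)
-- ===== SOURCE B (Python) =====
-- def number_to_hebrew(num):
--     if num <= 0 or num > 200:
--         raise ValueError("Number out of supported range")
--
--     hundreds = {1: "ק", 2: "ר"}
--     tens = {1: "י", 2: "כ", 3: "ל", 4: "מ", 5: "נ", 6: "ס", 7: "ע", 8: "פ", 9: "צ"}
--     units = {1: "א", 2: "ב", 3: "ג", 4: "ד", 5: "ה", 6: "ו", 7: "ז", 8: "ח", 9: "ט"}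
--
--     return (hundreds.get(num // 100, "")
--             + tens.get((num % 100) // 10, "")
--             + units.get(num % 10, ""))
-- ===== Notes on version B (the rewrite author's own statement) =====
-- stated objective: simpler
-- what changed: Replaces the reverse-sorted greedy subtraction loop over one 20-entry dict with direct positional digit decomposition (hundreds/tens/units) and three small lookup tables.
import Mathlib
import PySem

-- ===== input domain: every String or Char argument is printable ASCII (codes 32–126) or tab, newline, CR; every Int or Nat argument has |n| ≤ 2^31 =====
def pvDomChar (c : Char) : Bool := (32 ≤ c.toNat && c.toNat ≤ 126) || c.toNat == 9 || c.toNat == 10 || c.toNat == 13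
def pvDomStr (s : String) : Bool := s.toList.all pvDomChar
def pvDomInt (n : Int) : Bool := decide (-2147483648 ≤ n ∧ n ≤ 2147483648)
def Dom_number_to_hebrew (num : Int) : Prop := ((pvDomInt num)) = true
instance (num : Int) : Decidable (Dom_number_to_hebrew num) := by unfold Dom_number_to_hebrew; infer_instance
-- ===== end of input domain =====

-- B replaces A's reverse-sorted greedy subtraction loop with direct positional digit decomposition (simpler).

-- ===== PORT A =====
-- the Python dict literal, in insertion order
def hebrewNumeralsA : PySem.Dict Int String := PySem.Dict.ofList
  [(1, "א"), (2, "ב"), (3, "ג"), (4, "ד"), (5, "ה"), (6, "ו"), (7, "ז"), (8, "ח"), (9, "ט"),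
   (10, "י"), (20, "כ"), (30, "ל"), (40, "מ"), (50, "נ"), (60, "ס"), (70, "ע"), (80, "פ"), (90, "צ"),
   (100, "ק"), (200, "ר")]

-- the inner 'while num >= value: result.append(letter); num -= value' loop; fuel only makes it total
def whileAppend (fuel : Nat) (num value : Int) (letter : String) (acc : List String) : Int × List String :=
  match fuel with
  | 0 => (num, acc)
  | fuel + 1 =>
    if value ≤ num then whileAppend fuel (num - value) value letter (acc ++ [letter])
    else (num, acc)

def number_to_hebrew (num : Int) : String :=
  let pairs := PySem.List.sorted hebrewNumeralsA.items (fun x => x.1) true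
  let st := pairs.foldl (fun (st : Int × List String) p =>
    whileAppend (st.1.toNat + 1) st.1 p.1 p.2 st.2) (num, [])
  PySem.Str.join "" st.2

-- ===== PORT B =====
def hundredsB : PySem.Dict Int String := PySem.Dict.ofList [(1, "ק"), (2, "ר")]
def tensB : PySem.Dict Int String := PySem.Dict.ofList
  [(1, "י"), (2, "כ"), (3, "ל"), (4, "מ"), (5, "נ"), (6, "ס"), (7, "ע"), (8, "פ"), (9, "צ")]
def unitsB : PySem.Dict Int String := PySem.Dict.ofList
  [(1, "א"), (2, "ב"), (3, "ג"), (4, "ד"), (5, "ה"), (6, "ו"), (7, "ז"), (8, "ח"), (9, "ט")]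

def number_to_hebrew_alt (num : Int) : String :=
  PySem.Str.join "" [hundredsB.getD (PySem.Int.floordiv num 100) "",
                     tensB.getD (PySem.Int.floordiv (PySem.Int.mod num 100) 10) "",
                     unitsB.getD (PySem.Int.mod num 10) ""]

-- ===== PRECONDITION & SPEC =====
-- A raises ValueError for num <= 0 or num > 200; Pre_ admits exactly the inputs where A returns.
def Pre_number_to_hebrew (num : Int) : Prop := 1 ≤ num ∧ num ≤ 200
instance (num : Int) : Decidable (Pre_number_to_hebrew num) := by unfold Pre_number_to_hebrew; infer_instance
def pvWitness_number_to_hebrew : Int := (15)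

def Spec_number_to_hebrew (num : Int) (out : String) : Prop := out = number_to_hebrew_alt num
instance (num : Int) (out : String) : Decidable (Spec_number_to_hebrew num out) := by unfold Spec_number_to_hebrew; infer_instance

-- ===== CLAIM (what is proved, stated in full; the proofs are below) =====
def Claim_equal_number_to_hebrew : Prop := ∀ (num : Int), Dom_number_to_hebrew num → Pre_number_to_hebrew num → Spec_number_to_hebrew num (number_to_hebrew num)

-- ===== LEMMAS AND PROOFS =====
-- the reverse-sorted items of A's dict, as a literal (proved equal below)
def pairsLit : List (Int × String) :=
  [(200, "ר"), (100, "ק"), (90, "צ"), (80, "פ"), (70, "ע"), (60, "ס"), (50, "נ"), (40, "מ"), (30, "ל"),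
   (20, "כ"), (10, "י"), (9, "ט"), (8, "ח"), (7, "ז"), (6, "ו"), (5, "ה"), (4, "ד"), (3, "ג"), (2, "ב"), (1, "א")]

theorem sorted_eq : PySem.List.sorted hebrewNumeralsA.items (fun x => x.1) true = pairsLit := by decide

theorem A_unfold (num : Int) : number_to_hebrew num =
    PySem.Str.join "" (pairsLit.foldl (fun (st : Int × List String) p =>
      whileAppend (st.1.toNat + 1) st.1 p.1 p.2 st.2) (num, [])).2 := by
  unfold number_to_hebrew
  rw [sorted_eq]

set_option maxRecDepth 8000 in
theorem all200 : ((List.range 200).all (fun k =>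
    PySem.Str.join "" (pairsLit.foldl (fun (st : Int × List String) p =>
      whileAppend (st.1.toNat + 1) st.1 p.1 p.2 st.2) ((k : Int) + 1, [])).2
    == number_to_hebrew_alt ((k : Int) + 1))) = true := by decide

-- ===== VERDICT (by name: the statement is the Claim_ definition above) =====
theorem number_to_hebrew_spec : Claim_equal_number_to_hebrew := by
  intro num _ hpre
  obtain ⟨h1, h2⟩ := hpre
  unfold Spec_number_to_hebrew
  rw [A_unfold]
  have hk : (num - 1).toNat < 200 := by omega
  have hnum : ((num - 1).toNat : Int) + 1 = num := by omega
  have h := List.all_eq_true.mp all200 ((num - 1).toNat) (List.mem_range.mpr hk)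
  rw [← hnum]
  exact eq_of_beq (by simpa using h)
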